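-- pv_equiv track=rewrite | github.com/aanishs/CSCI-461-Project | code_submission_packet/src/feature_ablation.py | define_feature_configurations
-- ===== SOURCE A (Python) =====
-- def define_feature_configurations(all_features):
--     """
--     Define 7 feature configurations for ablation study.
--     """
--     configs = {}
--
--     # Config 1: Temporal only
--     configs['temporal_only'] = [f for f in all_features if any(
--         x in f for x in ['hour', 'day_of_week', 'is_weekend', 'day_of_month', 'month', 'timeOfDay_encoded']
--     )]
--
--     # Config 2: Sequence only
--     configs['sequence_only'] = [f for f in all_features if any(
--         x in f for x in ['prev_intensity', 'time_since_prev', 'prev_type', 'prev_timeOfDay']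
--     )]
--
--     # Config 3: Time-window only
--     configs['window_only'] = [f for f in all_features if f.startswith('window_')]
--
--     # Config 4: User-level only
--     configs['user_only'] = [f for f in all_features if f.startswith('user_')]
--
--     # Config 5: Categorical only
--     configs['categorical_only'] = [f for f in all_features if any(
--         x in f for x in ['type_encoded', 'mood_encoded', 'trigger_encoded', 'has_mood', 'has_trigger']
--     )]
--
--     # Config 6: All except engineered
--     engineered = [f for f in all_features if any(
--         x in f for x in ['intensity_x_count', 'intensity_trend', 'volatility', 'mood_x', 'trigger_x', 'weekend_x']
--     )]
--     configs['no_engineered'] = [f for f in all_features if f not in engineered]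
--
--     # Config 7: All features
--     configs['all_features'] = all_features
--
--     return configs
-- ===== SOURCE B (Python) =====
-- def _matches(f, mode, pats):
--     if mode == 'prefix':
--         return any(f.startswith(p) for p in pats)
--     if mode == 'none':
--         return not any(x in f for x in pats)
--     return any(x in f for x in pats)
--
-- SPECS = [
--     ('temporal_only', 'any', ['hour', 'day_of_week', 'is_weekend', 'day_of_month', 'month', 'timeOfDay_encoded']),
--     ('sequence_only', 'any', ['prev_intensity', 'time_since_prev', 'prev_type', 'prev_timeOfDay']),
--     ('window_only', 'prefix', ['window_']),
--     ('user_only', 'prefix', ['user_']),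
--     ('categorical_only', 'any', ['type_encoded', 'mood_encoded', 'trigger_encoded', 'has_mood', 'has_trigger']),
--     ('no_engineered', 'none', ['intensity_x_count', 'intensity_trend', 'volatility', 'mood_x', 'trigger_x', 'weekend_x']),
-- ]
--
-- def define_feature_configurations(all_features):
--     # Tag every feature with each category it matches, producing a flat
--     # (category, feature) event stream, then group the stream by category.
--     events = [(name, f)
--               for f in all_features
--               for (name, mode, pats) in SPECS
--               if _matches(f, mode, pats)]
--     configs = {name: [f for (n, f) in events if n == name] for (name, _, _) in SPECS}
--     configs['all_features'] = all_features
--     return configs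
-- ===== Notes on version B (the rewrite author's own statement) =====
-- stated objective: alternative
-- what changed: Replaces seven independent filtered scans (including building an engineered list and re-scanning it for 'f not in engineered') with a data-driven table of category specs: each feature is tagged with every category it matches into a flat (category, feature) event stream, which is then grouped by category name; membership in 'no_engineered' is decided directly from the engineered keywords.
import Mathlib
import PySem

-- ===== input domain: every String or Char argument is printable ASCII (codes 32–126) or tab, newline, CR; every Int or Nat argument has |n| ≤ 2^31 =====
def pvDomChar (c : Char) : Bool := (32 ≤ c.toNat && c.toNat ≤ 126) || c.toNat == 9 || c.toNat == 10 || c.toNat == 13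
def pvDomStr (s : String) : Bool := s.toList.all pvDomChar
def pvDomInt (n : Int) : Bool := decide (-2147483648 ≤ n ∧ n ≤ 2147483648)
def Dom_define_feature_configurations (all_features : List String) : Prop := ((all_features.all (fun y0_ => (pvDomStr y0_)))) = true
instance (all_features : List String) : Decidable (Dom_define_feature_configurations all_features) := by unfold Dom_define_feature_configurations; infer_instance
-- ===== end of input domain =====

-- B replaces seven independent filtered scans with a data-driven table of category specs:
-- it tags each feature with every category it matches into a flat (category, feature) event
-- stream and groups that stream by category name (alternative decomposition).

-- ===== PORT A =====
def define_feature_configurations (all_features : List String) : List (String × List String) :=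
  let configs : PySem.Dict String (List String) := PySem.Dict.empty
  let configs := configs.insert "temporal_only" (all_features.filter (fun f =>
    (["hour", "day_of_week", "is_weekend", "day_of_month", "month", "timeOfDay_encoded"]).any (fun x => PySem.Str.isIn x f)))
  let configs := configs.insert "sequence_only" (all_features.filter (fun f =>
    (["prev_intensity", "time_since_prev", "prev_type", "prev_timeOfDay"]).any (fun x => PySem.Str.isIn x f)))
  let configs := configs.insert "window_only" (all_features.filter (fun f => PySem.Str.startswith f "window_"))
  let configs := configs.insert "user_only" (all_features.filter (fun f => PySem.Str.startswith f "user_"))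
  let configs := configs.insert "categorical_only" (all_features.filter (fun f =>
    (["type_encoded", "mood_encoded", "trigger_encoded", "has_mood", "has_trigger"]).any (fun x => PySem.Str.isIn x f)))
  let engineered := all_features.filter (fun f =>
    (["intensity_x_count", "intensity_trend", "volatility", "mood_x", "trigger_x", "weekend_x"]).any (fun x => PySem.Str.isIn x f))
  let configs := configs.insert "no_engineered" (all_features.filter (fun f => !engineered.contains f))
  let configs := configs.insert "all_features" all_features
  configs.items

-- ===== PORT B =====
-- helper _matches of Source B
def pvMatches (f : String) (mode : String) (pats : List String) : Bool :=
  if mode == "prefix" then pats.any (fun p => PySem.Str.startswith f p)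
  else if mode == "none" then !(pats.any (fun x => PySem.Str.isIn x f))
  else pats.any (fun x => PySem.Str.isIn x f)

-- the SPECS table of Source B
def pvSpecs : List (String × String × List String) :=
  [("temporal_only", "any", ["hour", "day_of_week", "is_weekend", "day_of_month", "month", "timeOfDay_encoded"]),
   ("sequence_only", "any", ["prev_intensity", "time_since_prev", "prev_type", "prev_timeOfDay"]),
   ("window_only", "prefix", ["window_"]),
   ("user_only", "prefix", ["user_"]),
   ("categorical_only", "any", ["type_encoded", "mood_encoded", "trigger_encoded", "has_mood", "has_trigger"]),
   ("no_engineered", "none", ["intensity_x_count", "intensity_trend", "volatility", "mood_x", "trigger_x", "weekend_x"])]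

-- the flat (category, feature) event stream of Source B
def pvEvents (all_features : List String) : List (String × String) :=
  all_features.flatMap (fun f =>
    (pvSpecs.filter (fun s => pvMatches f s.2.1 s.2.2)).map (fun s => (s.1, f)))

def define_feature_configurations_alt (all_features : List String) : List (String × List String) :=
  let events := pvEvents all_features
  (pvSpecs.map (fun s => (s.1, (events.filter (fun e => e.1 == s.1)).map (fun e => e.2))))
    ++ [("all_features", all_features)]

-- ===== PRECONDITION & SPEC =====
def Spec_define_feature_configurations (all_features : List String) (out : List (String × List String)) : Prop := out = define_feature_configurations_alt all_features
instance (all_features : List String) (out : List (String × List String)) : Decidable (Spec_define_feature_configurations all_features out) := by unfold Spec_define_feature_configurations; infer_instance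

-- ===== CLAIM (what is proved, stated in full; the proofs are below) =====
def Claim_equal_define_feature_configurations : Prop := ∀ (all_features : List String), Dom_define_feature_configurations all_features → Spec_define_feature_configurations all_features (define_feature_configurations all_features)

-- ===== LEMMAS AND PROOFS =====

-- the events contributed by a single feature f, restricted to one category name,
-- are [(name, f)] iff f matches that category's spec (names in pvSpecs are distinct)
theorem pv_contrib (f name mode : String) (pats : List String)
    (h : pvSpecs.filter (fun s => s.1 == name) = [(name, mode, pats)]) :
    ((pvSpecs.filter (fun s => pvMatches f s.2.1 s.2.2)).map (fun s => (s.1, f))).filter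
        (fun e => e.1 == name)
      = if pvMatches f mode pats then [(name, f)] else [] := by
  rw [List.filter_map]
  have : ((pvSpecs.filter (fun s => pvMatches f s.2.1 s.2.2)).filter
      (fun s => ((fun s : String × String × List String => (s.1, f)) s).1 == name))
      = (pvSpecs.filter (fun s => s.1 == name)).filter (fun s => pvMatches f s.2.1 s.2.2) := by
    simp only [List.filter_filter]
    exact List.filter_congr (fun a _ => by rw [Bool.and_comm])
  rw [show (Function.comp (fun e : String × String => e.1 == name)
      (fun s : String × String × List String => (s.1, f)))
      = (fun s : String × String × List String => ((fun s : String × String × List String => (s.1, f)) s).1 == name) from rfl] at *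
  rw [this, h]
  by_cases hm : pvMatches f mode pats <;> simp [hm, List.filter]

-- grouping the event stream by a category name recovers the plain filter of all_features
theorem pv_group (name mode : String) (pats : List String)
    (h : pvSpecs.filter (fun s => s.1 == name) = [(name, mode, pats)]) (l : List String) :
    ((pvEvents l).filter (fun e => e.1 == name)).map (fun e => e.2)
      = l.filter (fun f => pvMatches f mode pats) := by
  induction l with
  | nil => rfl
  | cons a l ih =>
    simp only [pvEvents, List.flatMap_cons, List.filter_append, List.map_append]
    rw [pv_contrib a name mode pats h]
    simp only [pvEvents] at ih
    rw [ih, List.filter_cons]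
    by_cases hm : pvMatches a mode pats <;> simp [hm]

-- 'f not in engineered' (engineered = the matching features) equals 'f matches no engineered keyword'
theorem pv_not_in_filter (l : List String) (q : String → Bool) :
    l.filter (fun f => !(l.filter q).contains f) = l.filter (fun f => !q f) := by
  apply List.filter_congr
  intro f hf
  by_cases h : q f = true
  · simp [List.mem_filter, hf, h]
  · simp only [Bool.not_eq_true] at h
    simp [List.mem_filter, h]

-- evaluate pvMatches at each literal mode
theorem pvMatches_any (f : String) (pats : List String) :
    pvMatches f "any" pats = pats.any (fun x => PySem.Str.isIn x f) := by simp [pvMatches]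
theorem pvMatches_prefix (f : String) (pats : List String) :
    pvMatches f "prefix" pats = pats.any (fun p => PySem.Str.startswith f p) := by simp [pvMatches]
theorem pvMatches_none (f : String) (pats : List String) :
    pvMatches f "none" pats = !(pats.any (fun x => PySem.Str.isIn x f)) := by simp [pvMatches]

-- ===== VERDICT (by name: the statement is the Claim_ definition above) =====
-- A's result, literally evaluated to its seven (name, list) pairs
theorem pvA_items (l : List String) : define_feature_configurations l =
  [("temporal_only", l.filter (fun f => (["hour", "day_of_week", "is_weekend", "day_of_month", "month", "timeOfDay_encoded"]).any (fun x => PySem.Str.isIn x f))),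
   ("sequence_only", l.filter (fun f => (["prev_intensity", "time_since_prev", "prev_type", "prev_timeOfDay"]).any (fun x => PySem.Str.isIn x f))),
   ("window_only", l.filter (fun f => PySem.Str.startswith f "window_")),
   ("user_only", l.filter (fun f => PySem.Str.startswith f "user_")),
   ("categorical_only", l.filter (fun f => (["type_encoded", "mood_encoded", "trigger_encoded", "has_mood", "has_trigger"]).any (fun x => PySem.Str.isIn x f))),
   ("no_engineered", l.filter (fun f => !(l.filter (fun g => (["intensity_x_count", "intensity_trend", "volatility", "mood_x", "trigger_x", "weekend_x"]).any (fun x => PySem.Str.isIn x g))).contains f)),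
   ("all_features", l)] := rfl

theorem define_feature_configurations_spec : Claim_equal_define_feature_configurations := by
  intro all_features _
  show _ = _
  simp only [define_feature_configurations_alt, pvSpecs, List.map_cons, List.map_nil]
  rw [pv_group "temporal_only" "any" ["hour", "day_of_week", "is_weekend", "day_of_month", "month", "timeOfDay_encoded"] (by decide) all_features,
      pv_group "sequence_only" "any" ["prev_intensity", "time_since_prev", "prev_type", "prev_timeOfDay"] (by decide) all_features,
      pv_group "window_only" "prefix" ["window_"] (by decide) all_features,
      pv_group "user_only" "prefix" ["user_"] (by decide) all_features,
      pv_group "categorical_only" "any" ["type_encoded", "mood_encoded", "trigger_encoded", "has_mood", "has_trigger"] (by decide) all_features,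
      pv_group "no_engineered" "none" ["intensity_x_count", "intensity_trend", "volatility", "mood_x", "trigger_x", "weekend_x"] (by decide) all_features]
  rw [pvA_items, pv_not_in_filter]
  simp only [pvMatches_any, pvMatches_prefix, pvMatches_none, List.any_cons, List.any_nil, Bool.or_false, List.cons_append, List.nil_append]
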